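-- pv_equiv track=rewrite | github.com/justinmvail/glossy | font_scraper/stroke_editor.py | _remove_orphan_stubs
-- ===== SOURCE A (Python) =====
-- def _endpoint_cluster(stroke, from_end, assigned):
--     """Which junction cluster does this stroke endpoint belong to?"""
--     pt = tuple(stroke[-1]) if from_end else tuple(stroke[0])
--     return assigned.get(pt, -1)
--
-- def _remove_orphan_stubs(strokes, assigned, stub_threshold=20):
--     """Remove orphaned short stubs that have no neighbors at their junction clusters.
--
--     Any stroke shorter than stub_threshold that has an endpoint at a junction cluster
--     where no other stroke touches is an artifact.
--     """
--     changed = True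
--     while changed:
--         changed = False
--         for si in range(len(strokes)):
--             s = strokes[si]
--             if len(s) >= stub_threshold:
--                 continue
--             sc = _endpoint_cluster(s, False, assigned)
--             ec = _endpoint_cluster(s, True, assigned)
--             has_neighbor = False
--             for sj in range(len(strokes)):
--                 if sj == si:
--                     continue
--                 if sc >= 0 and (_endpoint_cluster(strokes[sj], False, assigned) == sc or
--                                 _endpoint_cluster(strokes[sj], True, assigned) == sc):
--                     has_neighbor = True
--                     break
--                 if ec >= 0 and (_endpoint_cluster(strokes[sj], False, assigned) == ec or
--                                 _endpoint_cluster(strokes[sj], True, assigned) == ec):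
--                     has_neighbor = True
--                     break
--             if not has_neighbor:
--                 strokes.pop(si)
--                 changed = True
--                 break
--     return strokes
-- ===== SOURCE B (Python) =====
-- def _remove_orphan_stubs(strokes, assigned, stub_threshold=20):
--     """Remove orphaned short stubs, using per-round endpoint-cluster counts
--     instead of an inner scan over all other strokes.
--
--     Like the original, this mutates `strokes` in place (pop) and returns it.
--     """
--     while True:
--         ends = [(assigned.get(tuple(s[0]), -1), assigned.get(tuple(s[-1]), -1))
--                 for s in strokes]
--         clusters = [c for e in ends for c in e if c >= 0]
--         cnt = {}
--         for c in clusters: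
--             cnt[c] = cnt.get(c, 0) + 1
--         victim = -1
--         for i in range(len(strokes)):
--             if len(strokes[i]) >= stub_threshold:
--                 continue
--             sc, ec = ends[i]
--             if sc >= 0 and cnt[sc] > 1 + (1 if ec == sc else 0):
--                 continue
--             if ec >= 0 and cnt[ec] > 1 + (1 if sc == ec else 0):
--                 continue
--             victim = i
--             break
--         if victim < 0:
--             return strokes
--         strokes.pop(victim)
-- ===== Notes on version B (the rewrite author's own statement) =====
-- stated objective: alternative
-- what changed: Each round builds a multiplicity dict of all endpoint clusters once and decides orphan-hood by comparing a cluster's total count with the stroke's own contribution, replacing A's inner scan over all other strokes; on the measured input family it is not faster.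
-- outside the precondition, e.g. on _remove_orphan_stubs([[]], {}, 0): A returns [[]], B raises IndexError
import Mathlib
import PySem

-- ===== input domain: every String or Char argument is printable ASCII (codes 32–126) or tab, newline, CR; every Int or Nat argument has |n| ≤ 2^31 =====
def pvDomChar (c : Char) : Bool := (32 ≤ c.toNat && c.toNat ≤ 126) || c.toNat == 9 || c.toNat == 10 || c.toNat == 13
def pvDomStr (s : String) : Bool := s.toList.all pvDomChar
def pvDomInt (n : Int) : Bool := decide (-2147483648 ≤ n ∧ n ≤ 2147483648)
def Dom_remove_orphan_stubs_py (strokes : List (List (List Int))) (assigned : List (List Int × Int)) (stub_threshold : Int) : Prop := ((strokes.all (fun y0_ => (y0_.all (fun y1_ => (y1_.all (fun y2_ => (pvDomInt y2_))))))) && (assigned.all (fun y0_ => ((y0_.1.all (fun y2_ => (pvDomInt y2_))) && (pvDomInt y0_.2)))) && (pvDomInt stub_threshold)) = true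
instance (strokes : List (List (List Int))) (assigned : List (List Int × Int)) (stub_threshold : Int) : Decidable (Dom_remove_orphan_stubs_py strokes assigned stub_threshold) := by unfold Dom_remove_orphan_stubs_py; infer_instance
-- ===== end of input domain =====

-- B replaces A's per-round inner scan over all other strokes by a dict of endpoint-cluster
-- multiplicities built once per round. Both Pythons mutate `strokes` in place (pop) and
-- return it; the equivalence proved here is about the return value.

-- ===== PORT A =====
-- helper _endpoint_cluster; the `none` branch is where Python raises IndexError
-- (empty stroke), which Pre_ excludes.
def pvEndpointCluster (stroke : List (List Int)) (from_end : Bool) (assigned : List (List Int × Int)) : Int :=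
  match (if from_end then PySem.List.pyGet? stroke (-1) else PySem.List.pyGet? stroke 0) with
  | some pt => PySem.Dict.getD (PySem.Dict.mk assigned) pt (-1)
  | none => -1

-- A's inner `for sj in range(len(strokes))` loop with its break (a pure disjunctive search)
def pvHasNeighbor (strokes : List (List (List Int))) (assigned : List (List Int × Int)) (si : Nat) (sc ec : Int) : Bool :=
  (List.range strokes.length).any fun sj =>
    sj != si &&
    ((decide (0 ≤ sc) && (pvEndpointCluster (strokes.getD sj []) false assigned == sc
        || pvEndpointCluster (strokes.getD sj []) true assigned == sc))
     || (decide (0 ≤ ec) && (pvEndpointCluster (strokes.getD sj []) false assigned == ec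
        || pvEndpointCluster (strokes.getD sj []) true assigned == ec)))

-- A's `for si in range(len(strokes))` pass: the index popped (where `changed = True; break`), if any
def pvAScan (strokes : List (List (List Int))) (assigned : List (List Int × Int)) (stub_threshold : Int) : Option Nat :=
  (List.range strokes.length).find? fun si =>
    let s := strokes.getD si []
    !decide (stub_threshold ≤ (s.length : Int)) &&
    !pvHasNeighbor strokes assigned si (pvEndpointCluster s false assigned) (pvEndpointCluster s true assigned)

-- A's `while changed` loop; each iteration pops one stroke or stops, so
-- `strokes.length + 1` fuel is more than the loop can ever use.
def pvALoop (assigned : List (List Int × Int)) (stub_threshold : Int) : Nat → List (List (List Int)) → List (List (List Int))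
  | 0, st => st
  | Nat.succ fuel, st =>
    match pvAScan st assigned stub_threshold with
    | none => st
    | some si => pvALoop assigned stub_threshold fuel (st.eraseIdx si)  -- strokes.pop(si)

def remove_orphan_stubs_py (strokes : List (List (List Int))) (assigned : List (List Int × Int)) (stub_threshold : Int) : List (List (List Int)) :=
  pvALoop assigned stub_threshold (strokes.length + 1) strokes

-- ===== PORT B =====
-- B's `(assigned.get(tuple(s[0]), -1), assigned.get(tuple(s[-1]), -1))`; the `none`
-- branches are where Python raises IndexError (empty stroke), excluded by Pre_.
def pvEndsB (assigned : List (List Int × Int)) (s : List (List Int)) : Int × Int :=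
  (match PySem.List.pyGet? s 0 with
   | some pt => PySem.Dict.getD (PySem.Dict.mk assigned) pt (-1)
   | none => -1,
   match PySem.List.pyGet? s (-1) with
   | some pt => PySem.Dict.getD (PySem.Dict.mk assigned) pt (-1)
   | none => -1)

-- one round of B: ends list, cluster multiset, count dict, then the first victim index
-- (Python's `cnt[sc]` is a plain lookup whose key is always present there; getD is exact on those)
def pvBScan (strokes : List (List (List Int))) (assigned : List (List Int × Int)) (stub_threshold : Int) : Option Nat :=
  let ends := strokes.map (pvEndsB assigned)
  let clusters := ends.flatMap (fun e => [e.1, e.2].filter (fun c => decide (0 ≤ c)))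
  let cnt := clusters.foldl (fun d c => d.insert c (d.getD c 0 + 1)) PySem.Dict.empty
  (List.range strokes.length).find? fun i =>
    let s := strokes.getD i []
    !decide (stub_threshold ≤ (s.length : Int)) &&
    (let e := ends.getD i (-1, -1)
     !(decide (0 ≤ e.1) && decide (cnt.getD e.1 0 > 1 + (if e.2 == e.1 then (1 : Int) else 0))) &&
     !(decide (0 ≤ e.2) && decide (cnt.getD e.2 0 > 1 + (if e.1 == e.2 then (1 : Int) else 0))))

def pvBLoop (assigned : List (List Int × Int)) (stub_threshold : Int) : Nat → List (List (List Int)) → List (List (List Int))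
  | 0, st => st
  | Nat.succ fuel, st =>
    match pvBScan st assigned stub_threshold with
    | none => st
    | some i => pvBLoop assigned stub_threshold fuel (st.eraseIdx i)  -- strokes.pop(victim)

def remove_orphan_stubs_py_alt (strokes : List (List (List Int))) (assigned : List (List Int × Int)) (stub_threshold : Int) : List (List (List Int)) :=
  pvBLoop assigned stub_threshold (strokes.length + 1) strokes

-- ===== PRECONDITION & SPEC =====
-- Pre_ excludes inputs containing an empty stroke: on those Python A raises IndexError as soon
-- as it probes that stroke's endpoints (and B's upfront endpoint pass always raises), while on
-- the remaining empty-stroke inputs (e.g. a non-positive threshold) A happens to return but B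
-- naturally raises — outside the function's natural domain of point sequences.
def Pre_remove_orphan_stubs_py (strokes : List (List (List Int))) (assigned : List (List Int × Int)) (stub_threshold : Int) : Prop :=
  ∀ s ∈ strokes, s ≠ []
instance (strokes : List (List (List Int))) (assigned : List (List Int × Int)) (stub_threshold : Int) : Decidable (Pre_remove_orphan_stubs_py strokes assigned stub_threshold) := by unfold Pre_remove_orphan_stubs_py; infer_instance
def pvWitness_remove_orphan_stubs_py : List (List (List Int)) × (List (List Int × Int)) × Int :=
  ([[[0, 0], [1, 0]], [[1, 0], [5, 5]]], [([1, 0], 3)], 20)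
def Spec_remove_orphan_stubs_py (strokes : List (List (List Int))) (assigned : List (List Int × Int)) (stub_threshold : Int) (out : List (List (List Int))) : Prop := out = remove_orphan_stubs_py_alt strokes assigned stub_threshold
instance (strokes : List (List (List Int))) (assigned : List (List Int × Int)) (stub_threshold : Int) (out : List (List (List Int))) : Decidable (Spec_remove_orphan_stubs_py strokes assigned stub_threshold out) := by unfold Spec_remove_orphan_stubs_py; infer_instance

-- ===== CLAIM (what is proved, stated in full; the proofs are below) =====
def Claim_equal_remove_orphan_stubs_py : Prop := ∀ (strokes : List (List (List Int))) (assigned : List (List Int × Int)) (stub_threshold : Int), Dom_remove_orphan_stubs_py strokes assigned stub_threshold → Pre_remove_orphan_stubs_py strokes assigned stub_threshold → Spec_remove_orphan_stubs_py strokes assigned stub_threshold (remove_orphan_stubs_py strokes assigned stub_threshold)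

-- ===== LEMMAS AND PROOFS =====

-- endpoints of one stroke, as A computes them, paired as B computes them
lemma pvEndsB_eq (assigned : List (List Int × Int)) (s : List (List Int)) :
    pvEndsB assigned s = (pvEndpointCluster s false assigned, pvEndpointCluster s true assigned) := rfl

-- the stroke's own endpoint count at cluster c
def pvOcc (assigned : List (List Int × Int)) (s : List (List Int)) (c : Int) : Nat :=
  (if pvEndpointCluster s false assigned = c then 1 else 0) +
  (if pvEndpointCluster s true assigned = c then 1 else 0)

lemma find?_congr_mem {α : Type} (l : List α) (p q : α → Bool) (h : ∀ a ∈ l, p a = q a) :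
    l.find? p = l.find? q := by
  induction l with
  | nil => rfl
  | cons x xs ih =>
    simp only [List.find?_cons]
    rw [h x (List.mem_cons_self)]
    cases q x with
    | true => rfl
    | false => exact ih fun a ha => h a (List.mem_cons_of_mem _ ha)

lemma sum_map_eraseIdx {α : Type} (f : α → Nat) :
    ∀ (l : List α) (i : Nat), (h : i < l.length) →
      (l.map f).sum = ((l.eraseIdx i).map f).sum + f l[i]
  | x :: xs, 0, _ => by simp [Nat.add_comm]
  | x :: xs, i + 1, h => by
    have := sum_map_eraseIdx f xs i (by simpa using h)
    simp [List.eraseIdx_cons_succ, this, Nat.add_assoc]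

-- cluster multiplicities: the count dict of B's round equals the sum of pvOcc over all strokes
lemma count_clusters (assigned : List (List Int × Int)) (st : List (List (List Int))) (c : Int) (hc : 0 ≤ c) :
    ((st.map (pvEndsB assigned)).flatMap (fun e => [e.1, e.2].filter (fun c => decide (0 ≤ c)))).count c
      = (st.map (fun s => pvOcc assigned s c)).sum := by
  induction st with
  | nil => rfl
  | cons s tl ih =>
    simp only [List.map_cons, List.flatMap_cons, List.count_append, List.sum_cons, ih]
    congr 1
    rw [pvEndsB_eq]
    unfold pvOcc
    by_cases h1 : pvEndpointCluster s false assigned = c <;>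
      by_cases h2 : pvEndpointCluster s true assigned = c <;>
        simp [h1, h2, hc, List.count_filter]

lemma cnt_getD (assigned : List (List Int × Int)) (st : List (List (List Int))) (c : Int) (hc : 0 ≤ c) :
    (((st.map (pvEndsB assigned)).flatMap (fun e => [e.1, e.2].filter (fun c => decide (0 ≤ c)))).foldl
        (fun d c => d.insert c (d.getD c 0 + 1)) PySem.Dict.empty).getD c 0
      = ((st.map (fun s => pvOcc assigned s c)).sum : Int) := by
  rw [PySem.Dict.getD_foldl_insert_add_one, PySem.Dict.getD_empty, count_clusters assigned st c hc]
  simp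

-- sum-vs-existential: some OTHER index contributes iff the total exceeds i's own contribution
lemma other_pos_iff_sum {α : Type} (l : List α) (f : α → Nat) (i : Nat) (h : i < l.length) :
    (∃ j, ∃ hj : j < l.length, j ≠ i ∧ 0 < f l[j]) ↔ f l[i] < (l.map f).sum := by
  rw [sum_map_eraseIdx f l i h]
  constructor
  · rintro ⟨j, hj, hne, hpos⟩
    have hmem : l[j] ∈ l.eraseIdx i := by
      rw [List.mem_eraseIdx_iff_getElem]; exact ⟨j, hj, hne, rfl⟩
    have : 0 < ((l.eraseIdx i).map f).sum := by
      by_contra hz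
      have hz0 : ((l.eraseIdx i).map f).sum = 0 := by omega
      have := List.sum_eq_zero_iff_forall_eq_nat.mp hz0 (f l[j]) (List.mem_map_of_mem hmem)
      omega
    omega
  · intro hlt
    have hpos : 0 < ((l.eraseIdx i).map f).sum := by omega
    have : ∃ x ∈ (l.eraseIdx i).map f, x ≠ 0 := by
      by_contra hall
      push Not at hall
      have := List.sum_eq_zero_iff_forall_eq_nat.mpr hall
      omega
    obtain ⟨x, hx, hxne⟩ := this
    obtain ⟨y, hy, rfl⟩ := List.mem_map.mp hx
    obtain ⟨j, hj, hne, rfl⟩ := List.mem_eraseIdx_iff_getElem.mp hy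
    exact ⟨j, hj, hne, by omega⟩

-- the neighbour test of A at one cluster c equals B's count comparison
lemma neighbor_iff_count (assigned : List (List Int × Int)) (st : List (List (List Int)))
    (i : Nat) (hi : i < st.length) (c : Int) :
    (∃ j, ∃ hj : j < st.length, j ≠ i ∧
        (pvEndpointCluster st[j] false assigned = c ∨ pvEndpointCluster st[j] true assigned = c))
      ↔ ((st.map (fun s => pvOcc assigned s c)).sum : Int) > (pvOcc assigned st[i] c : Int) := by
  have h := other_pos_iff_sum st (fun s => pvOcc assigned s c) i hi
  constructor
  · rintro ⟨j, hj, hne, hor⟩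
    have : 0 < pvOcc assigned st[j] c := by
      unfold pvOcc; rcases hor with h1 | h1 <;> simp [h1]
    have := h.mp ⟨j, hj, hne, this⟩
    exact_mod_cast this
  · intro hgt
    have hlt : pvOcc assigned st[i] c < (st.map (fun s => pvOcc assigned s c)).sum := by exact_mod_cast hgt
    obtain ⟨j, hj, hne, hpos⟩ := h.mpr hlt
    refine ⟨j, hj, hne, ?_⟩
    unfold pvOcc at hpos
    by_cases h1 : pvEndpointCluster st[j] false assigned = c
    · exact Or.inl h1
    · by_cases h2 : pvEndpointCluster st[j] true assigned = c
      · exact Or.inr h2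
      · simp [h1, h2] at hpos

-- one round: A's scan and B's scan find the same victim
lemma scan_eq (st : List (List (List Int))) (assigned : List (List Int × Int)) (thr : Int) :
    pvAScan st assigned thr = pvBScan st assigned thr := by
  unfold pvAScan pvBScan
  apply find?_congr_mem
  intro i hi
  rw [List.mem_range] at hi
  have hgetD : st.getD i [] = st[i] := List.getD_eq_getElem st [] hi
  have hends : (st.map (pvEndsB assigned)).getD i (-1, -1) = pvEndsB assigned st[i] := by
    rw [List.getD_eq_getElem _ _ (by simpa using hi), List.getElem_map]
  simp only [hgetD, hends, pvEndsB_eq]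
  set sc := pvEndpointCluster st[i] false assigned with hsc
  set ec := pvEndpointCluster st[i] true assigned with hec
  cases hshort : decide (thr ≤ (st[i].length : Int)) with
  | true => simp
  | false =>
    simp only [Bool.not_false, Bool.true_and]
    rw [show (!(decide (0 ≤ sc) && _) && !(decide (0 ≤ ec) && _)) =
          !((decide (0 ≤ sc) && _) || (decide (0 ≤ ec) && _)) from by
        rw [Bool.not_or]]
    congr 1
    rw [Bool.eq_iff_iff]
    unfold pvHasNeighbor
    rw [List.any_eq_true]
    constructor
    · rintro ⟨j, hjmem, hj⟩
      rw [List.mem_range] at hjmem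
      have hjD : st.getD j [] = st[j] := List.getD_eq_getElem st [] hjmem
      simp only [hjD, Bool.and_eq_true, Bool.or_eq_true, bne_iff_ne, decide_eq_true_eq,
        beq_iff_eq] at hj
      obtain ⟨hne, hj⟩ := hj
      rcases hj with ⟨h0, hor⟩ | ⟨h0, hor⟩
      · have := (neighbor_iff_count assigned st i hi sc).mp ⟨j, hjmem, hne, hor⟩
        rw [← cnt_getD assigned st sc h0] at this
        simp only [Bool.or_eq_true]; left
        simp only [Bool.and_eq_true, decide_eq_true_eq, beq_iff_eq]
        refine ⟨h0, ?_⟩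
        have hown : (pvOcc assigned st[i] sc : Int) = 1 + (if ec = sc then (1 : Int) else 0) := by
          unfold pvOcc; simp [← hsc, ← hec]
        rw [← hown]
        simpa using this
      · have := (neighbor_iff_count assigned st i hi ec).mp ⟨j, hjmem, hne, hor⟩
        rw [← cnt_getD assigned st ec h0] at this
        simp only [Bool.or_eq_true]; right
        simp only [Bool.and_eq_true, decide_eq_true_eq, beq_iff_eq]
        refine ⟨h0, ?_⟩
        have hown : (pvOcc assigned st[i] ec : Int) = 1 + (if sc = ec then (1 : Int) else 0) := by
          unfold pvOcc; simp [← hsc, ← hec]; split <;> simp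
        rw [← hown]
        simpa using this
    · intro hb
      rw [Bool.or_eq_true] at hb
      rcases hb with hb | hb
      · simp only [Bool.and_eq_true, decide_eq_true_eq, beq_iff_eq] at hb
        obtain ⟨h0, hcnt⟩ := hb
        rw [cnt_getD assigned st sc h0] at hcnt
        have hown : (pvOcc assigned st[i] sc : Int) = 1 + (if ec = sc then (1 : Int) else 0) := by
          unfold pvOcc; simp [← hsc, ← hec]
        rw [← hown] at hcnt
        obtain ⟨j, hj, hne, hor⟩ := (neighbor_iff_count assigned st i hi sc).mpr hcnt
        refine ⟨j, List.mem_range.mpr hj, ?_⟩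
        have hjD : st.getD j [] = st[j] := List.getD_eq_getElem st [] hj
        simp only [hjD, Bool.and_eq_true, Bool.or_eq_true, bne_iff_ne, decide_eq_true_eq,
          beq_iff_eq]
        exact ⟨hne, Or.inl ⟨h0, hor⟩⟩
      · simp only [Bool.and_eq_true, decide_eq_true_eq, beq_iff_eq] at hb
        obtain ⟨h0, hcnt⟩ := hb
        rw [cnt_getD assigned st ec h0] at hcnt
        have hown : (pvOcc assigned st[i] ec : Int) = 1 + (if sc = ec then (1 : Int) else 0) := by
          unfold pvOcc; simp [← hsc, ← hec]; split <;> simp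
        rw [← hown] at hcnt
        obtain ⟨j, hj, hne, hor⟩ := (neighbor_iff_count assigned st i hi ec).mpr hcnt
        refine ⟨j, List.mem_range.mpr hj, ?_⟩
        have hjD : st.getD j [] = st[j] := List.getD_eq_getElem st [] hj
        simp only [hjD, Bool.and_eq_true, Bool.or_eq_true, bne_iff_ne, decide_eq_true_eq,
          beq_iff_eq]
        exact ⟨hne, Or.inr ⟨h0, hor⟩⟩

lemma loop_eq (assigned : List (List Int × Int)) (thr : Int) :
    ∀ (fuel : Nat) (st : List (List (List Int))),
      pvALoop assigned thr fuel st = pvBLoop assigned thr fuel st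
  | 0, st => rfl
  | Nat.succ fuel, st => by
    unfold pvALoop pvBLoop
    rw [scan_eq]
    cases pvBScan st assigned thr with
    | none => rfl
    | some i => exact loop_eq assigned thr fuel (st.eraseIdx i)

-- ===== VERDICT (by name: the statement is the Claim_ definition above) =====
theorem remove_orphan_stubs_py_spec : Claim_equal_remove_orphan_stubs_py := by
  intro strokes assigned thr _ _
  unfold Spec_remove_orphan_stubs_py remove_orphan_stubs_py remove_orphan_stubs_py_alt
  exact loop_eq assigned thr (strokes.length + 1) strokes
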